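-- pv_equiv track=rewrite | github.com/stanley7342/zephyr-thread-rt58x | tools/isp_cli/isp_client.py | plan_erase
-- ===== SOURCE A (Python) =====
-- ERASE_SECTOR_4K = 0x01
--
-- ERASE_BLOCK_64K = 0x03
--
-- def plan_erase(start: int, length: int, sector_only: bool = False):
--     """Yield (addr, erase_mode) covering [start, start+length).
--
--     Uses 64K block erase when both addr and remaining length allow; otherwise
--     4K sector erase. 32K mode is intentionally avoided -- Rafael ROM ISP has
--     been observed to silently half-erase with mode 0x02, leaving stale bits
--     that prevent subsequent page programming (manifests as status 0x51).
--
--     sector_only=True forces 4K sectors everywhere (slower but survives ROM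
--     ISP 64K half-erase bugs seen on certain flash blocks).
--     """
--     end = start + length
--     addr = start
--     while addr < end:
--         if sector_only:
--             yield addr, ERASE_SECTOR_4K
--             addr += 0x1000
--             continue
--         remaining = end - addr
--         if remaining >= 0x10000 and (addr & 0xFFFF) == 0:
--             yield addr, ERASE_BLOCK_64K
--             addr += 0x10000
--         else:
--             yield addr, ERASE_SECTOR_4K
--             addr += 0x1000
-- ===== SOURCE B (Python) =====
-- ERASE_SECTOR_4K = 0x01
--
-- ERASE_BLOCK_64K = 0x03
--
--
-- def plan_erase(start: int, length: int, sector_only: bool = False):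
--     """Yield (addr, erase_mode) covering [start, start+length).
--
--     Phase decomposition: sector_only is one plain 4K loop; otherwise a
--     4K head up to the first 64K boundary, a 64K block run, then a 4K tail.
--     """
--     end = start + length
--     addr = start
--     if sector_only:
--         while addr < end:
--             yield addr, ERASE_SECTOR_4K
--             addr += 0x1000
--         return
--     # head: 4K sectors until addr hits a 64K boundary (or range ends)
--     while addr < end and (addr & 0xFFFF) != 0:
--         yield addr, ERASE_SECTOR_4K
--         addr += 0x1000
--     # body: full 64K blocks
--     while end - addr >= 0x10000:
--         yield addr, ERASE_BLOCK_64K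
--         addr += 0x10000
--     # tail: remaining 4K sectors
--     while addr < end:
--         yield addr, ERASE_SECTOR_4K
--         addr += 0x1000
-- ===== Notes on version B (the rewrite author's own statement) =====
-- stated objective: alternative
-- what changed: Replaces the single loop that re-tests alignment and remaining length on every iteration with three explicit phases: a 4K head up to the first 64K boundary, a run of 64K blocks, and a 4K tail (sector_only is one plain 4K loop).
import Mathlib
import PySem

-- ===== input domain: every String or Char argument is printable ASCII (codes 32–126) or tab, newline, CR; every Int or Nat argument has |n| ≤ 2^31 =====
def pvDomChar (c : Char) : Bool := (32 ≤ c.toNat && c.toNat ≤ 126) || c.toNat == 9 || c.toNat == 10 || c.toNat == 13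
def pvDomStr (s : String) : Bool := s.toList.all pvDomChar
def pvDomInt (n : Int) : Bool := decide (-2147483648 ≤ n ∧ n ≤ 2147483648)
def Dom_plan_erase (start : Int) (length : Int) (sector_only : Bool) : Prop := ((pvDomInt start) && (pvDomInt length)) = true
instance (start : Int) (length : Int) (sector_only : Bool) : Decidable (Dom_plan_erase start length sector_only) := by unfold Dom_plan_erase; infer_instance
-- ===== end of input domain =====

-- B replaces A's single alignment-retesting loop by three explicit phases (4K head, 64K run, 4K tail); same output, same cost (objective: alternative).
-- ===== PORT A =====
-- A's while loop; `addr & 0xFFFF == 0` is ported as `addr % 65536 == 0`, exact for all ints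
-- (Python's & with a nonnegative mask equals Python's %, which is Lean's Int.emod for a positive divisor).
def planEraseLoop (addr e : Int) (sector_only : Bool) : List (Int × Int) :=
  if h : addr < e then
    if sector_only then
      (addr, 0x01) :: planEraseLoop (addr + 0x1000) e sector_only
    else if e - addr ≥ 0x10000 ∧ addr % 0x10000 = 0 then
      (addr, 0x03) :: planEraseLoop (addr + 0x10000) e sector_only
    else
      (addr, 0x01) :: planEraseLoop (addr + 0x1000) e sector_only
  else []
termination_by (e - addr).toNat
decreasing_by all_goals omega

def plan_erase (start : Int) (length : Int) (sector_only : Bool) : List (Int × Int) :=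
  planEraseLoop start (start + length) sector_only

-- ===== PORT B =====
-- tail phase (also the sector_only loop): plain 4K sectors while addr < e
def altSectors (addr e : Int) : List (Int × Int) :=
  if h : addr < e then (addr, 0x01) :: altSectors (addr + 0x1000) e else []
termination_by (e - addr).toNat
decreasing_by omega

-- body phase: full 64K blocks, then the tail
def altBlocks (addr e : Int) : List (Int × Int) :=
  if h : e - addr ≥ 0x10000 then (addr, 0x03) :: altBlocks (addr + 0x10000) e
  else altSectors addr e
termination_by (e - addr).toNat
decreasing_by omega

-- head phase: 4K sectors until a 64K boundary (or the range ends), then the body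
def altHead (addr e : Int) : List (Int × Int) :=
  if h : addr < e ∧ addr % 0x10000 ≠ 0 then (addr, 0x01) :: altHead (addr + 0x1000) e
  else altBlocks addr e
termination_by (e - addr).toNat
decreasing_by omega

def plan_erase_alt (start : Int) (length : Int) (sector_only : Bool) : List (Int × Int) :=
  if sector_only then altSectors start (start + length)
  else altHead start (start + length)

-- ===== PRECONDITION & SPEC =====
def Spec_plan_erase (start : Int) (length : Int) (sector_only : Bool) (out : List (Int × Int)) : Prop := out = plan_erase_alt start length sector_only
instance (start : Int) (length : Int) (sector_only : Bool) (out : List (Int × Int)) : Decidable (Spec_plan_erase start length sector_only out) := by unfold Spec_plan_erase; infer_instance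

-- ===== CLAIM (what is proved, stated in full; the proofs are below) =====
def Claim_equal_plan_erase : Prop := ∀ (start : Int) (length : Int) (sector_only : Bool), Dom_plan_erase start length sector_only → Spec_plan_erase start length sector_only (plan_erase start length sector_only)

-- ===== LEMMAS AND PROOFS =====

-- ===== VERDICT (by name: the statement is the Claim_ definition above) =====
-- sector_only: A's loop is exactly the plain 4K loop
theorem loop_sector (addr e : Int) : planEraseLoop addr e true = altSectors addr e := by
  by_cases h : addr < e
  · rw [planEraseLoop, altSectors, dif_pos h, dif_pos h, if_pos rfl,
      loop_sector (addr + 0x1000) e]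
  · rw [planEraseLoop, altSectors, dif_neg h, dif_neg h]
termination_by (e - addr).toNat
decreasing_by omega

-- once fewer than 64K bytes remain, the head phase degenerates into the tail loop
theorem head_eq_sectors (addr e : Int) (hlt : e - addr < 0x10000) :
    altHead addr e = altSectors addr e := by
  by_cases h : addr < e ∧ addr % 0x10000 ≠ 0
  · rw [altHead, dif_pos h, altSectors, dif_pos h.1,
      head_eq_sectors (addr + 0x1000) e (by omega)]
  · rw [altHead, dif_neg h, altBlocks, dif_neg (by omega)]
termination_by (e - addr).toNat
decreasing_by omega

-- at a 64K boundary the head phase is the block phase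
theorem head_eq_blocks (addr e : Int) (ha : addr % 0x10000 = 0) :
    altHead addr e = altBlocks addr e := by
  rw [altHead, dif_neg (by simp [ha])]

-- main equivalence of the non-sector_only loop with B's three phases
theorem loop_full (addr e : Int) : planEraseLoop addr e false = altHead addr e := by
  by_cases h : addr < e
  · by_cases ha : addr % 0x10000 = 0
    · by_cases hr : e - addr ≥ 0x10000
      · rw [planEraseLoop, dif_pos h, if_neg (by simp), if_pos ⟨hr, ha⟩,
          loop_full (addr + 0x10000) e, head_eq_blocks addr e ha, altBlocks, dif_pos hr,
          head_eq_blocks (addr + 0x10000) e (by omega)]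
      · rw [planEraseLoop, dif_pos h, if_neg (by simp), if_neg (by tauto),
          loop_full (addr + 0x1000) e, head_eq_blocks addr e ha, altBlocks,
          dif_neg hr, altSectors, dif_pos h, head_eq_sectors (addr + 0x1000) e (by omega)]
    · conv_rhs => rw [altHead, dif_pos ⟨h, ha⟩]
      rw [planEraseLoop, dif_pos h, if_neg (by simp), if_neg (by tauto),
        loop_full (addr + 0x1000) e]
  · rw [planEraseLoop, dif_neg h, altHead, dif_neg (by tauto), altBlocks,
      dif_neg (by omega), altSectors, dif_neg h]
termination_by (e - addr).toNat
decreasing_by all_goals omega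

-- ===== VERDICT =====
theorem plan_erase_spec : Claim_equal_plan_erase := by
  intro start length sector_only _
  unfold Spec_plan_erase plan_erase plan_erase_alt
  cases sector_only
  · simp [loop_full]
  · simp [loop_sector]
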